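-- pv_equiv track=rewrite | github.com/tompko/aoc | day11.py | valid_pass
-- ===== SOURCE A (Python) =====
-- def valid_pass(password):
--     alphabet = "abcdefghijklmnopqrstuvwxyz"
--     triples = ["".join(aas) for aas in zip(alphabet, alphabet[1:], alphabet[2:])]
--     pairs = ["".join(aas) for aas in zip(alphabet, alphabet)]
--
--     forbidden = ["i", "o", "l"]
--
--     for f in forbidden:
--         if f in password:
--             return False
--
--     if not any([t in password for t in triples]):
--         return False
--
--     count = 0
--     for p in pairs:
--         if p in password:
--             count += 1
--
--     if count < 2:
--         return False
--
--     return True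
-- ===== SOURCE B (Python) =====
-- def valid_pass(password):
--     straight = False
--     doubles = set()
--     n = len(password)
--     for i in range(n):
--         c = password[i]
--         if c in "iol":
--             return False
--         if i + 2 < n and ord(password[i + 1]) == ord(c) + 1 \
--                 and ord(password[i + 2]) == ord(c) + 2 \
--                 and 'a' <= c and password[i + 2] <= 'z':
--             straight = True
--         if i + 1 < n and password[i + 1] == c and 'a' <= c <= 'z':
--             doubles.add(c)
--     return straight and len(doubles) >= 2
-- ===== Notes on version B (the rewrite author's own statement) =====
-- stated objective: alternative
-- what changed: Replaces the build-three-tables-and-run-53-substring-searches strategy with one single pass over the characters that checks forbidden letters, detects a straight by ord arithmetic on each 3-window, and collects distinct doubled lowercase letters in a set.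
import Mathlib
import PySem

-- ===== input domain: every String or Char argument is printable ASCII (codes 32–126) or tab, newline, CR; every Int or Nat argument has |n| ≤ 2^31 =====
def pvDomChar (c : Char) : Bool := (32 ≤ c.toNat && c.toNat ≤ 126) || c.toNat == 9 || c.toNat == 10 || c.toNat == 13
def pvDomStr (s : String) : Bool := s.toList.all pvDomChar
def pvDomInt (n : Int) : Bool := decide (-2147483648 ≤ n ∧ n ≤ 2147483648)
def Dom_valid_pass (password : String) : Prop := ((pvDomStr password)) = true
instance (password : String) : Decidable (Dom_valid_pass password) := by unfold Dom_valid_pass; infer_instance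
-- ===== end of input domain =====

-- B replaces A's three precomputed string tables and 53 substring searches by one
-- single pass over the characters (forbidden check, ord-arithmetic straight window,
-- set of doubled lowercase letters); alternative decomposition, same exact result.


-- ===== PORT A =====
def valid_pass (password : String) : Bool :=
  let alphabet := "abcdefghijklmnopqrstuvwxyz"
  let triples : List String :=
    ((alphabet.toList.zip (PySem.Str.slice alphabet (some 1) none).toList).zip
        (PySem.Str.slice alphabet (some 2) none).toList).map
      (fun aas => String.ofList [aas.1.1, aas.1.2, aas.2])
  let pairs : List String :=
    (alphabet.toList.zip alphabet.toList).map (fun aas => String.ofList [aas.1, aas.2])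
  let forbidden : List String := ["i", "o", "l"]
  if forbidden.any (fun f => PySem.Str.isIn f password) then false
  else if !(triples.any (fun t => PySem.Str.isIn t password)) then false
  else
    let count : Int :=
      pairs.foldl (fun count p => if PySem.Str.isIn p password then count + 1 else count) 0
    if count < 2 then false else true

-- ===== PORT B =====
-- single pass: early False on 'i'/'o'/'l'; straight via ord arithmetic on the 3-window;
-- doubled lowercase letters collected in a set; at the end: straight ∧ len(doubles) ≥ 2
def pvScan : List Char → Bool → PySem.Set Char → Bool
  | [], straight, doubles => straight && decide (2 ≤ PySem.Set.len doubles)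
  | c :: rest, straight, doubles =>
    if c = 'i' ∨ c = 'o' ∨ c = 'l' then false
    else
      let straight' := straight ||
        (match rest with
         | b :: d :: _ =>
             b.toNat == c.toNat + 1 && d.toNat == c.toNat + 2 && decide ('a' ≤ c) && decide (d ≤ 'z')
         | _ => false)
      let doubles' :=
        match rest with
        | b :: _ => if b = c ∧ 'a' ≤ c ∧ c ≤ 'z' then PySem.Set.add doubles c else doubles
        | _ => doubles
      pvScan rest straight' doubles'

def valid_pass_alt (password : String) : Bool :=
  pvScan password.toList false PySem.Set.empty

-- ===== PRECONDITION & SPEC =====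
def Spec_valid_pass (password : String) (out : Bool) : Prop := out = valid_pass_alt password
instance (password : String) (out : Bool) : Decidable (Spec_valid_pass password out) := by unfold Spec_valid_pass; infer_instance

-- ===== CLAIM (what is proved, stated in full; the proofs are below) =====
def Claim_equal_valid_pass : Prop := ∀ (password : String), Dom_valid_pass password → Spec_valid_pass password (valid_pass password)

-- ===== LEMMAS AND PROOFS =====

-- abstract pieces of B's single pass
def pvForb (l : List Char) : Bool := l.any (fun c => decide (c = 'i' ∨ c = 'o' ∨ c = 'l'))

def pvWin (x y z : Char) : Bool :=
  y.toNat == x.toNat + 1 && z.toNat == x.toNat + 2 && decide ('a' ≤ x) && decide (z ≤ 'z')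

def pvStraight : List Char → Bool
  | x :: y :: z :: r => pvWin x y z || pvStraight (y :: z :: r)
  | _ => false

def pvDbl (c b : Char) : Bool := decide (b = c ∧ 'a' ≤ c ∧ c ≤ 'z')

def pvDbAcc : PySem.Set Char → List Char → PySem.Set Char
  | db, c :: b :: r => pvDbAcc (if pvDbl c b then PySem.Set.add db c else db) (b :: r)
  | db, _ => db

def pvDblIn (x : Char) : List Char → Bool
  | c :: b :: r => (pvDbl c b && x == c) || pvDblIn x (b :: r)
  | _ => false

-- characterisation of the scan in terms of the three independent pieces
theorem pvScan_eq (l : List Char) (st : Bool) (db : PySem.Set Char) :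
    pvScan l st db =
      (!pvForb l && ((st || pvStraight l) && decide (2 ≤ PySem.Set.len (pvDbAcc db l)))) := by
  induction l generalizing st db with
  | nil => simp [pvScan, pvForb, pvStraight, pvDbAcc]
  | cons c rest ih =>
    have hstep : ∀ (h : ¬(c = 'i' ∨ c = 'o' ∨ c = 'l')), pvForb (c :: rest) = pvForb rest := by
      intro h; simp [pvForb, h]
    have hhead : ∀ (t : List Char), (c = 'i' ∨ c = 'o' ∨ c = 'l') → pvForb (c :: t) = true := by
      intro t h; simp only [pvForb, List.any_cons, Bool.or_eq_true]; left; simpa using h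
    cases rest with
    | nil =>
      rw [show pvScan [c] st db
            = (if c = 'i' ∨ c = 'o' ∨ c = 'l' then false else pvScan [] (st || false) db) from rfl]
      by_cases hc : c = 'i' ∨ c = 'o' ∨ c = 'l'
      · rw [if_pos hc, hhead _ hc]; rfl
      · rw [if_neg hc, ih, hstep hc]
        simp [pvStraight, pvDbAcc, pvForb]
    | cons b r =>
      cases r with
      | nil =>
        rw [show pvScan (c :: b :: []) st db
              = (if c = 'i' ∨ c = 'o' ∨ c = 'l' then false else
                  pvScan [b] (st || false)
                    (if b = c ∧ 'a' ≤ c ∧ c ≤ 'z' then PySem.Set.add db c else db)) from rfl]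
      -- MARKER1
        by_cases hc : c = 'i' ∨ c = 'o' ∨ c = 'l'
        · rw [if_pos hc, hhead _ hc]; rfl
        · rw [if_neg hc, ih, hstep hc,
              show pvDbAcc db (c :: b :: [])
                = pvDbAcc (if pvDbl c b then PySem.Set.add db c else db) (b :: []) from rfl,
              show pvStraight (c :: b :: []) = false from rfl,
              show pvStraight [b] = false from rfl]
          by_cases hd : b = c ∧ 'a' ≤ c ∧ c ≤ 'z'
          · rw [if_pos hd, if_pos (by simp [pvDbl, hd])]
            simp [pvDbAcc]
          · rw [if_neg hd, if_neg (by simp [pvDbl, hd])]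
            simp [pvDbAcc]
      | cons d r' =>
        rw [show pvScan (c :: b :: d :: r') st db
              = (if c = 'i' ∨ c = 'o' ∨ c = 'l' then false else
                  pvScan (b :: d :: r')
                    (st || (b.toNat == c.toNat + 1 && d.toNat == c.toNat + 2
                            && decide ('a' ≤ c) && decide (d ≤ 'z')))
                    (if b = c ∧ 'a' ≤ c ∧ c ≤ 'z' then PySem.Set.add db c else db)) from rfl]
        by_cases hc : c = 'i' ∨ c = 'o' ∨ c = 'l'
        · rw [if_pos hc, hhead _ hc]; rfl
        · rw [if_neg hc, ih, hstep hc,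
              show pvDbAcc db (c :: b :: d :: r')
                = pvDbAcc (if pvDbl c b then PySem.Set.add db c else db) (b :: d :: r') from rfl,
              show pvStraight (c :: b :: d :: r')
                = (pvWin c b d || pvStraight (b :: d :: r')) from rfl]
          by_cases hd : b = c ∧ 'a' ≤ c ∧ c ≤ 'z'
          · rw [if_pos hd, if_pos (by simp [pvDbl, hd])]
            cases st <;> simp [pvWin]
          · rw [if_neg hd, if_neg (by simp [pvDbl, hd])]
            cases st <;> simp [pvWin]

-- [a] is an infix iff a is a member
theorem singleton_infix_iff {a : Char} {l : List Char} : [a] <:+: l ↔ a ∈ l := by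
  constructor
  · intro h; exact h.mem (by simp)
  · intro h
    obtain ⟨s, t, rfl⟩ := List.append_of_mem h
    exact ⟨s, t, by simp⟩

theorem pvStraight_iff (l : List Char) :
    pvStraight l = true ↔ ∃ x y z, pvWin x y z = true ∧ [x, y, z] <:+: l := by
  induction l with
  | nil =>
    refine ⟨fun h => absurd h (by decide), ?_⟩
    rintro ⟨x, y, z, -, h⟩
    have := h.length_le; simp at this
  | cons c rest ih =>
    cases rest with
    | nil =>
      refine ⟨fun h => absurd h (by rw [show pvStraight [c] = false from rfl]; simp), ?_⟩
      rintro ⟨x, y, z, -, h⟩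
      have := h.length_le; simp at this
    | cons b r =>
      cases r with
      | nil =>
        refine ⟨fun h => absurd h (by rw [show pvStraight [c, b] = false from rfl]; simp), ?_⟩
        rintro ⟨x, y, z, -, h⟩
        have := h.length_le; simp at this
      | cons d r' =>
        rw [show pvStraight (c :: b :: d :: r') = (pvWin c b d || pvStraight (b :: d :: r')) from rfl]
        constructor
        · intro h
          rcases Bool.or_eq_true_iff.mp h with h | h
          · exact ⟨c, b, d, h, [], r', by simp⟩
          · obtain ⟨x, y, z, hw, hi⟩ := ih.mp h
            exact ⟨x, y, z, hw, hi.trans (List.infix_cons (List.infix_refl _))⟩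
        · rintro ⟨x, y, z, hw, hi⟩
          rcases List.infix_cons_iff.mp hi with hp | hi'
          · obtain ⟨hx, hp2⟩ := List.cons_prefix_cons.mp hp
            obtain ⟨hy, hp3⟩ := List.cons_prefix_cons.mp hp2
            obtain ⟨hz, -⟩ := List.cons_prefix_cons.mp hp3
            rw [hx, hy, hz] at hw
            exact Bool.or_eq_true_iff.mpr (Or.inl hw)
          · exact Bool.or_eq_true_iff.mpr (Or.inr (ih.mpr ⟨x, y, z, hw, hi'⟩))

theorem pvDblIn_iff (x : Char) (l : List Char) :
    pvDblIn x l = true ↔ ('a' ≤ x ∧ x ≤ 'z') ∧ [x, x] <:+: l := by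
  induction l with
  | nil =>
    refine ⟨fun h => absurd h (by rw [show pvDblIn x [] = false from rfl]; simp), ?_⟩
    rintro ⟨-, h⟩
    have := h.length_le; simp at this
  | cons c rest ih =>
    cases rest with
    | nil =>
      refine ⟨fun h => absurd h (by rw [show pvDblIn x [c] = false from rfl]; simp), ?_⟩
      rintro ⟨-, h⟩
      have := h.length_le; simp at this
    | cons b r =>
      rw [show pvDblIn x (c :: b :: r) = ((pvDbl c b && x == c) || pvDblIn x (b :: r)) from rfl]
      constructor
      · intro h
        rcases Bool.or_eq_true_iff.mp h with h | h
        · obtain ⟨h1, h2⟩ := Bool.and_eq_true_iff.mp h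
          obtain ⟨hbc, hlo, hhi⟩ := of_decide_eq_true h1
          have hx : x = c := by simpa using h2
          subst hx
          exact ⟨⟨hlo, hhi⟩, [], r, by rw [hbc]; simp⟩
        · obtain ⟨hl, hi⟩ := (ih).mp h
          exact ⟨hl, hi.trans (List.infix_cons (List.infix_refl _))⟩
      · rintro ⟨⟨hlo, hhi⟩, hi⟩
        rcases List.infix_cons_iff.mp hi with hp | hi'
        · obtain ⟨hx, hp2⟩ := List.cons_prefix_cons.mp hp
          obtain ⟨hb, -⟩ := List.cons_prefix_cons.mp hp2
          refine Bool.or_eq_true_iff.mpr (Or.inl (Bool.and_eq_true_iff.mpr ⟨?_, by simp [hx]⟩))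
          exact decide_eq_true (by refine ⟨?_, ?_, ?_⟩ <;> (first | rw [← hb, ← hx] | rw [← hx]) <;> assumption)
        · exact Bool.or_eq_true_iff.mpr (Or.inr (ih.mpr ⟨⟨hlo, hhi⟩, hi'⟩))

theorem mem_pvDbAcc (l : List Char) (db : PySem.Set Char) (x : Char) :
    x ∈ pvDbAcc db l ↔ x ∈ db ∨ pvDblIn x l = true := by
  induction l generalizing db with
  | nil => simp [pvDbAcc, pvDblIn]
  | cons c rest ih =>
    cases rest with
    | nil => simp [pvDbAcc, pvDblIn]
    | cons b r =>
      rw [show pvDbAcc db (c :: b :: r) = pvDbAcc (if pvDbl c b then PySem.Set.add db c else db) (b :: r) from rfl,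
          show pvDblIn x (c :: b :: r) = ((pvDbl c b && x == c) || pvDblIn x (b :: r)) from rfl]
      rw [ih]
      by_cases hd : pvDbl c b = true
      · simp [hd, PySem.Set.mem_add]
        tauto
      · simp [hd]

theorem nodup_pvDbAcc (l : List Char) (db : PySem.Set Char) (h : db.Nodup) :
    (pvDbAcc db l).Nodup := by
  induction l generalizing db with
  | nil => simpa [pvDbAcc] using h
  | cons c rest ih =>
    cases rest with
    | nil => simpa [pvDbAcc] using h
    | cons b r =>
      rw [show pvDbAcc db (c :: b :: r) = pvDbAcc (if pvDbl c b then PySem.Set.add db c else db) (b :: r) from rfl]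
      apply ih
      split
      · exact PySem.Set.nodup_add _ _ h
      · exact h

-- characters: order vs code points, and the alphabet as a range
theorem char_le_iff {c d : Char} : c ≤ d ↔ c.toNat ≤ d.toNat := by
  rw [Char.le_def, UInt32.le_iff_toNat_le]; rfl

theorem mem_alphabet_iff {c : Char} :
    c ∈ "abcdefghijklmnopqrstuvwxyz".toList ↔ 'a' ≤ c ∧ c ≤ 'z' := by
  constructor
  · intro h
    have hall : ("abcdefghijklmnopqrstuvwxyz".toList.all
        (fun c => decide ('a' ≤ c ∧ c ≤ 'z'))) = true := by decide
    exact of_decide_eq_true (List.all_eq_true.mp hall c h)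
  · rintro ⟨hlo, hhi⟩
    have h1 : 97 ≤ c.toNat := char_le_iff.mp hlo
    have h2 : c.toNat ≤ 122 := char_le_iff.mp hhi
    have hform : "abcdefghijklmnopqrstuvwxyz".toList
        = (List.range 26).map (fun i => Char.ofNat (97 + i)) := by decide
    rw [hform, List.mem_map]
    refine ⟨c.toNat - 97, List.mem_range.mpr (by omega), ?_⟩
    rw [show 97 + (c.toNat - 97) = c.toNat by omega]
    exact Char.ofNat_toNat c

-- A's three substring searches for "i"/"o"/"l" are B's forbidden-character check
theorem forb_any_eq (p : String) :
    (["i", "o", "l"].any fun f => PySem.Str.isIn f p) = pvForb p.toList := by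
  rw [Bool.eq_iff_iff]
  simp only [List.any_cons, List.any_nil, Bool.or_eq_true, Bool.or_false,
    PySem.Str.isIn_iff_infix]
  rw [show ("i" : String).toList = ['i'] from rfl, show ("o" : String).toList = ['o'] from rfl,
      show ("l" : String).toList = ['l'] from rfl]
  simp only [singleton_infix_iff, pvForb, List.any_eq_true, decide_eq_true_eq]
  constructor
  · rintro (h | h | h)
    · exact ⟨'i', h, Or.inl rfl⟩
    · exact ⟨'o', h, Or.inr (Or.inl rfl)⟩
    · exact ⟨'l', h, Or.inr (Or.inr rfl)⟩
  · rintro ⟨x, hx, rfl | rfl | rfl⟩ <;> tauto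

-- A's 24-entry straight table searched as substrings is B's 3-window scan
theorem trip_any_eq (p : String) (T : List String)
    (hT : T = (List.range 24).map
      (fun i => String.ofList [Char.ofNat (97 + i), Char.ofNat (98 + i), Char.ofNat (99 + i)])) :
    (T.any fun t => PySem.Str.isIn t p) = pvStraight p.toList := by
  subst hT
  rw [Bool.eq_iff_iff, List.any_map]
  simp only [List.any_eq_true, List.mem_range, Function.comp]
  rw [pvStraight_iff]
  constructor
  · rintro ⟨i, hi, hin⟩
    rw [PySem.Str.isIn_iff_infix, String.toList_ofList] at hin
    refine ⟨_, _, _, ?_, hin⟩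
    interval_cases i <;> decide
  · rintro ⟨x, y, z, hw, hi⟩
    simp only [pvWin, Bool.and_eq_true, beq_iff_eq, decide_eq_true_eq] at hw
    obtain ⟨⟨⟨hy, hz⟩, ha⟩, hz2⟩ := hw
    have h97 : 97 ≤ x.toNat := by simpa using char_le_iff.mp ha
    have h122 : z.toNat ≤ 122 := by simpa using char_le_iff.mp hz2
    refine ⟨x.toNat - 97, by omega, ?_⟩
    rw [PySem.Str.isIn_iff_infix, String.toList_ofList]
    rw [show 97 + (x.toNat - 97) = x.toNat by omega,
        show 98 + (x.toNat - 97) = y.toNat by omega,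
        show 99 + (x.toNat - 97) = z.toNat by omega,
        Char.ofNat_toNat, Char.ofNat_toNat, Char.ofNat_toNat]
    exact hi

-- A's count of doubled-pair substrings is the size of B's set of doubled letters
theorem pairs_count_eq (p : String) (P : List String)
    (hP : P = "abcdefghijklmnopqrstuvwxyz".toList.map (fun c => String.ofList [c, c])) :
    (P.foldl (fun count q => if PySem.Str.isIn q p then count + 1 else count) (0 : Int))
      = PySem.Set.len (pvDbAcc PySem.Set.empty p.toList) := by
  subst hP
  rw [PySem.List.foldl_count_if, zero_add, List.countP_map,
      List.countP_eq_length_filter]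
  have hperm : ("abcdefghijklmnopqrstuvwxyz".toList.filter
      ((fun t => PySem.Str.isIn t p) ∘ fun c => String.ofList [c, c])).Perm
      (pvDbAcc PySem.Set.empty p.toList) := by
    refine (List.perm_ext_iff_of_nodup
      (List.Nodup.filter _ (by decide))
      (nodup_pvDbAcc _ _ List.nodup_nil)).mpr ?_
    intro a
    rw [List.mem_filter, mem_pvDbAcc]
    simp only [Function.comp, PySem.Str.isIn_iff_infix, String.toList_ofList,
      mem_alphabet_iff, pvDblIn_iff, List.not_mem_nil, false_or]
  rw [hperm.length_eq]
  rfl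

-- ===== VERDICT (by name: the statement is the Claim_ definition above) =====
theorem valid_pass_spec : Claim_equal_valid_pass := by
  intro p _
  unfold Spec_valid_pass
  rw [valid_pass_alt, pvScan_eq]
  simp only [valid_pass]
  rw [forb_any_eq p, trip_any_eq p _ (by decide), pairs_count_eq p _ (by decide)]
  cases hF : pvForb p.toList <;> cases hS : pvStraight p.toList <;>
    simp only [Bool.not_true, Bool.not_false, Bool.false_and, Bool.true_and,
      Bool.false_or, Bool.and_false, Bool.false_eq_true,
      if_true, if_false]
  by_cases h2 : PySem.Set.len (pvDbAcc PySem.Set.empty p.toList) < 2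
  · rw [if_pos h2, decide_eq_false (by omega)]
  · rw [if_neg h2, decide_eq_true (by omega)]
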